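-- pv_equiv track=rewrite | github.com/figield/coding_task | tasks/dirams_dist.py | solution
-- ===== SOURCE A (Python) =====
-- from collections import defaultdict
--
-- def solution(s):
--     max_distance = -1
--     digrams = defaultdict(list)
--     for i in range(len(s) - 1):
--         digram = s[i:i + 2]
--         digrams[digram].append(i)
--         if len(digrams[digram]) > 1:
--             distance = digrams[digram][-1] - digrams[digram][0]
--             if distance > max_distance:
--                 max_distance = distance
--     return max_distance
-- ===== SOURCE B (Python) =====
-- def solution(s):
--     n = len(s)
--     d = n - 2
--     while d > 0:
--         if any(s[i:i + 2] == s[i + d:i + d + 2] for i in range(n - 1 - d)):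
--             return d
--         d -= 1
--     return -1
-- ===== Notes on version B (the rewrite author's own statement) =====
-- stated objective: alternative
-- what changed: B discards A's hash table of index lists and running max entirely: it searches candidate distances d from n-2 down to 1 and returns the first (hence largest) d at which some digram repeats at exactly that distance, -1 if none.
import Mathlib
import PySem

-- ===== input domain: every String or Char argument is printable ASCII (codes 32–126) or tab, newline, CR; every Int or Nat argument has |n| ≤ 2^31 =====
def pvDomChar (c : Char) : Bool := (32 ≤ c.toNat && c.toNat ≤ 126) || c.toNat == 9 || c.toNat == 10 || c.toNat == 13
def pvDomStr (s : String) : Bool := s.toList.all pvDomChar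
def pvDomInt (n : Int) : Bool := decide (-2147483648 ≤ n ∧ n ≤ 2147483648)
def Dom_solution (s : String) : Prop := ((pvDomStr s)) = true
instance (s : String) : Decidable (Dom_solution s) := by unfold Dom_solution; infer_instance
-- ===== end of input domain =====

-- B replaces A's hash table of digram index lists and in-loop running max by a search over
-- candidate distances d = n-2 … 1, returning the first d at which some digram repeats at that
-- distance (objective: alternative algorithm; same return value everywhere; not faster).

-- the digram s[i:i+2], shared spelling of both Pythons' slice
def dgm (s : String) (i : Int) : String := PySem.Str.slice s (some i) (some (i + 2))

-- ===== PORT A =====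
-- one iteration of A's loop: append i to digrams[digram], then maybe update the running max
def stepA (s : String) (st : Int × PySem.Dict String (List Int)) (i : Int) :
    Int × PySem.Dict String (List Int) :=
  let digram := dgm s i
  let digrams := st.2.modify digram [] (· ++ [i])          -- defaultdict(list): digrams[digram].append(i)
  let lst := digrams.getD digram []
  if 1 < lst.length then
    -- the list is nonempty by construction, so the [-1]/[0] indexings cannot raise
    let distance := PySem.List.pyGetD lst (-1) 0 - PySem.List.pyGetD lst 0 0
    (if st.1 < distance then distance else st.1, digrams)
  else (st.1, digrams)

def solution (s : String) : Int :=
  ((PySem.List.pyRange 0 (PySem.Str.len s - 1) 1).foldl (stepA s)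
    ((-1 : Int), PySem.Dict.empty)).1

-- ===== PORT B =====
-- the while-loop of Source B: try distance d, else d-1, …; return -1 when d reaches 0
def findDown (s : String) (n : Int) (d : Int) : Int :=
  if h : 0 < d then
    if (PySem.List.pyRange 0 (n - 1 - d) 1).any (fun i => dgm s i == dgm s (i + d)) then d
    else findDown s n (d - 1)
  else -1
termination_by d.toNat
decreasing_by omega

def solution_alt (s : String) : Int :=
  findDown s (PySem.Str.len s) (PySem.Str.len s - 2)

-- ===== PRECONDITION & SPEC =====
def Spec_solution (s : String) (out : Int) : Prop := out = solution_alt s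
instance (s : String) (out : Int) : Decidable (Spec_solution s out) := by unfold Spec_solution; infer_instance

-- ===== CLAIM (what is proved, stated in full; the proofs are below) =====
def Claim_equal_solution : Prop := ∀ (s : String), Dom_solution s → Spec_solution s (solution s)

-- ===== LEMMAS AND PROOFS =====

-- "some digram repeats at distance e": the condition Source B's inner `any` tests
def Pb (s : String) (n e : Int) : Prop :=
  ∃ i : Int, 0 ≤ i ∧ i < n - 1 - e ∧ dgm s i = dgm s (i + e)

-- invariant pieces for A's loop after processing indices 0 … k-1
def UBnd (s : String) (k m : Int) : Prop :=
  ∀ i j : Int, 0 ≤ i → i < j → j < k → dgm s i = dgm s j → j - i ≤ m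

def Att (s : String) (k m : Int) : Prop :=
  m = -1 ∨ ∃ i j : Int, 0 ≤ i ∧ i < j ∧ j < k ∧ dgm s i = dgm s j ∧ m = j - i

def DInv (s : String) (k : Int) (D : PySem.Dict String (List Int)) : Prop :=
  ∀ dg : String, D.getD dg [] = (PySem.List.pyRange 0 k 1).filter (fun i => dgm s i == dg)

theorem mem_filter_range (s : String) (k : Int) (dg : String) (x : Int) :
    x ∈ (PySem.List.pyRange 0 k 1).filter (fun i => dgm s i == dg) ↔
      (0 ≤ x ∧ x < k) ∧ dgm s x = dg := by
  simp [List.mem_filter, PySem.List.mem_pyRange_one]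

theorem head_min (s : String) (k : Int) (dg : String) (a : Int) (u : List Int)
    (h : (PySem.List.pyRange 0 k 1).filter (fun i => dgm s i == dg) = a :: u) :
    ∀ x ∈ (PySem.List.pyRange 0 k 1).filter (fun i => dgm s i == dg), a ≤ x := by
  have hp : ((PySem.List.pyRange 0 k 1).filter (fun i => dgm s i == dg)).Pairwise (· < ·) :=
    (PySem.List.pairwise_lt_pyRange_one 0 k).filter _
  rw [h] at hp ⊢
  rw [List.pairwise_cons] at hp
  intro x hx
  rcases List.mem_cons.mp hx with rfl | hx
  · exact le_rfl
  · exact le_of_lt (hp.1 x hx)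

-- one step of A's loop preserves the invariant, moving the bound from k to k+1
theorem stepA_inv (s : String) (k m : Int) (D : PySem.Dict String (List Int))
    (hk : 0 ≤ k) (hD : DInv s k D) (hU : UBnd s k m) (hA : Att s k m) :
    DInv s (k + 1) (stepA s (m, D) k).2 ∧ UBnd s (k + 1) (stepA s (m, D) k).1 ∧
      Att s (k + 1) (stepA s (m, D) k).1 := by
  have hsplit : PySem.List.pyRange 0 (k + 1) 1 = PySem.List.pyRange 0 k 1 ++ [k] :=
    PySem.List.pyRange_one_succ_right (a := 0) (b := k) hk
  -- the updated dict satisfies DInv at k+1 in both branches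
  have hD' : DInv s (k + 1) (D.modify (dgm s k) [] (· ++ [k])) := by
    intro dg
    by_cases he : dg = dgm s k
    · subst he
      rw [PySem.Dict.getD_modify, if_pos rfl, hsplit, List.filter_append, hD]
      simp
    · rw [PySem.Dict.getD_modify, if_neg he, hsplit, List.filter_append, hD]
      have hne : (dgm s k == dg) = false := beq_eq_false_iff_ne.mpr (fun h => he h.symm)
      simp [hne]
  have hget : (D.modify (dgm s k) [] (· ++ [k])).getD (dgm s k) [] =
      D.getD (dgm s k) [] ++ [k] := PySem.Dict.getD_modify_self ..
  cases hcase : D.getD (dgm s k) [] with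
  | nil =>
    -- fresh digram: list length is 1, A leaves the max alone
    have hs : stepA s (m, D) k = (m, D.modify (dgm s k) [] (· ++ [k])) := by
      simp only [stepA, hget, hcase]
      rw [if_neg (by simp)]
    rw [hs]
    refine ⟨hD', ?_, ?_⟩
    · intro i j hi hij hjk hdg
      by_cases hj : j < k
      · exact hU i j hi hij hj hdg
      · -- j = k: then i would be in the (empty) old list
        have hj' : j = k := by omega
        have : i ∈ (PySem.List.pyRange 0 k 1).filter (fun x => dgm s x == dgm s k) :=
          (mem_filter_range s k (dgm s k) i).mpr ⟨⟨hi, by omega⟩, by rw [← hj']; exact hdg⟩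
        rw [← hD (dgm s k), hcase] at this
        cases this
    · rcases hA with h | ⟨i, j, hi, hij, hjk, hdg, hm⟩
      · exact Or.inl h
      · exact Or.inr ⟨i, j, hi, hij, by omega, hdg, hm⟩
  | cons a u =>
    -- repeated digram: distance = k - a where a is the first occurrence
    have hfilter : (PySem.List.pyRange 0 k 1).filter (fun i => dgm s i == dgm s k) = a :: u :=
      (hD (dgm s k)).symm.trans hcase
    have hhead : ∀ x ∈ (PySem.List.pyRange 0 k 1).filter (fun i => dgm s i == dgm s k), a ≤ x :=
      head_min s k (dgm s k) a u hfilter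
    have ha : (0 ≤ a ∧ a < k) ∧ dgm s a = dgm s k := by
      rw [← mem_filter_range s k (dgm s k) a, hfilter]
      simp
    have hs : stepA s (m, D) k =
        (if m < k - a then k - a else m, D.modify (dgm s k) [] (· ++ [k])) := by
      simp only [stepA, hget, hcase]
      rw [if_pos (by simp)]
      have h1 : PySem.List.pyGetD ((a :: u) ++ [k]) (-1) 0 = k :=
        PySem.List.pyGetD_neg_one_append_singleton ..
      have h2 : PySem.List.pyGetD ((a :: u) ++ [k]) 0 0 = a := by
        simp [PySem.List.pyGetD_zero]
      rw [h1, h2]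
    rw [hs]
    refine ⟨hD', ?_, ?_⟩
    · intro i j hi hij hjk hdg
      by_cases hj : j < k
      · have := hU i j hi hij hj hdg
        dsimp only
        split_ifs <;> omega
      · have hj' : j = k := by omega
        have hmem : i ∈ (PySem.List.pyRange 0 k 1).filter (fun x => dgm s x == dgm s k) :=
          (mem_filter_range s k (dgm s k) i).mpr ⟨⟨hi, by omega⟩, by rw [← hj']; exact hdg⟩
        have := hhead i hmem
        dsimp only
        split_ifs <;> omega
    · dsimp only
      split_ifs with h
      · exact Or.inr ⟨a, k, ha.1.1, ha.1.2, by omega, ha.2, rfl⟩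
      · rcases hA with h' | ⟨i, j, hi, hij, hjk, hdg, hm⟩
        · exact Or.inl h'
        · exact Or.inr ⟨i, j, hi, hij, by omega, hdg, hm⟩

theorem loopA (s : String) (b : Int) :
    ∀ (fuel : Nat) (k m : Int) (D : PySem.Dict String (List Int)),
      (b - k).toNat ≤ fuel → 0 ≤ k → k ≤ b →
      DInv s k D → UBnd s k m → Att s k m →
      UBnd s b ((PySem.List.pyRange k b 1).foldl (stepA s) (m, D)).1 ∧
        Att s b ((PySem.List.pyRange k b 1).foldl (stepA s) (m, D)).1 := by
  intro fuel
  induction fuel with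
  | zero =>
    intro k m D hf h0 hkb hD hU hA
    have : b = k := by omega
    subst this
    rw [PySem.List.pyRange_one_eq_nil le_rfl]
    exact ⟨hU, hA⟩
  | succ fuel ih =>
    intro k m D hf h0 hkb hD hU hA
    by_cases hlt : k < b
    · rw [PySem.List.pyRange_one_cons hlt, List.foldl_cons]
      obtain ⟨hD', hU', hA'⟩ := stepA_inv s k m D h0 hD hU hA
      exact ih (k + 1) _ _ (by omega) (by omega) (by omega) hD' hU' hA'
    · have : b = k := by omega
      subst this
      rw [PySem.List.pyRange_one_eq_nil le_rfl]
      exact ⟨hU, hA⟩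

-- full characterisation of Source B's descending search
theorem findDown_char (s : String) (n : Int) :
    ∀ (fuel : Nat) (d : Int), d.toNat ≤ fuel →
      (findDown s n d = -1 ∧ ∀ e, 0 < e → e ≤ d → ¬ Pb s n e) ∨
      (0 < findDown s n d ∧ findDown s n d ≤ d ∧ Pb s n (findDown s n d) ∧
        ∀ e, findDown s n d < e → e ≤ d → ¬ Pb s n e) := by
  intro fuel
  induction fuel with
  | zero =>
    intro d hf
    rw [findDown, dif_neg (by omega)]
    exact Or.inl ⟨rfl, fun e he hed => absurd hed (by omega)⟩
  | succ fuel ih =>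
    intro d hf
    by_cases hd : 0 < d
    · rw [findDown, dif_pos hd]
      by_cases hany :
          (PySem.List.pyRange 0 (n - 1 - d) 1).any (fun i => dgm s i == dgm s (i + d)) = true
      · rw [if_pos hany]
        have hPb : Pb s n d := by
          rcases List.any_eq_true.mp hany with ⟨i, hi, hp⟩
          rw [PySem.List.mem_pyRange_one] at hi
          exact ⟨i, hi.1, hi.2, beq_iff_eq.mp hp⟩
        exact Or.inr ⟨hd, le_rfl, hPb, fun e h1 h2 => absurd (lt_of_lt_of_le h1 h2) (lt_irrefl d)⟩
      · rw [if_neg hany]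
        have hnPb : ¬ Pb s n d := by
          intro ⟨i, h1, h2, h3⟩
          exact hany (List.any_eq_true.mpr
            ⟨i, PySem.List.mem_pyRange_one.mpr ⟨h1, h2⟩, beq_iff_eq.mpr h3⟩)
        rcases ih (d - 1) (by omega) with ⟨hr, hno⟩ | ⟨h1, h2, h3, hno⟩
        · refine Or.inl ⟨hr, fun e he hed => ?_⟩
          by_cases hed' : e ≤ d - 1
          · exact hno e he hed'
          · have : e = d := by omega
            exact this ▸ hnPb
        · refine Or.inr ⟨h1, by omega, h3, fun e he hed => ?_⟩
          by_cases hed' : e ≤ d - 1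
          · exact hno e he hed'
          · have : e = d := by omega
            exact this ▸ hnPb
    · rw [findDown, dif_neg hd]
      exact Or.inl ⟨rfl, fun e he hed => absurd hed (by omega)⟩

-- a pair at distance j-i inside [0, n-1) is exactly a witness of Pb at that distance
theorem pair_to_Pb (s : String) (n i j : Int) (hi : 0 ≤ i) (_hij : i < j) (hj : j < n - 1)
    (hdg : dgm s i = dgm s j) : Pb s n (j - i) :=
  ⟨i, hi, by omega, by rw [show i + (j - i) = j by omega]; exact hdg⟩

theorem Pb_to_pair (s : String) (n e : Int) (he : 0 < e) (h : Pb s n e) :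
    ∃ i j : Int, 0 ≤ i ∧ i < j ∧ j < n - 1 ∧ dgm s i = dgm s j ∧ e = j - i := by
  obtain ⟨i, h1, h2, h3⟩ := h
  exact ⟨i, i + e, h1, by omega, by omega, h3, by omega⟩

theorem str_len_nonneg (s : String) : 0 ≤ PySem.Str.len s := by
  simp [PySem.Str.len_eq]

-- ===== VERDICT (by name: the statement is the Claim_ definition above) =====
theorem solution_spec : Claim_equal_solution := by
  intro s _
  unfold Spec_solution solution solution_alt
  have hn := str_len_nonneg s
  set n := PySem.Str.len s with hndef
  by_cases h2 : n - 1 ≤ 0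
  · -- too short: A's loop range is empty, B's countdown starts below 1
    rw [PySem.List.pyRange_one_eq_nil h2, findDown, dif_neg (by omega)]
    rfl
  ·
    -- characterise A's result
    have hDInv : DInv s 0 (PySem.Dict.empty) := by
      intro dg
      rw [PySem.List.pyRange_one_eq_nil le_rfl]
      simp [PySem.Dict.getD_empty]
    have hUB : UBnd s 0 (-1) := fun i j hi hij hj _ => absurd hj (by omega)
    obtain ⟨hU, hA⟩ := loopA s (n - 1) (n - 1).toNat 0 (-1) PySem.Dict.empty
      (by omega) le_rfl (by omega) hDInv hUB (Or.inl rfl)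
    set r := ((PySem.List.pyRange 0 (n - 1) 1).foldl (stepA s) (-1, PySem.Dict.empty)).1
    -- characterise B's result
    rcases findDown_char s n (n - 2).toNat (n - 2) le_rfl with
      ⟨hr, hno⟩ | ⟨hpos, hle, hPb, hno⟩
    · -- B found nothing: A can have no pair either
      rw [hr]
      rcases hA with h | ⟨i, j, hi, hij, hj, hdg, hm⟩
      · exact h
      · exact absurd (pair_to_Pb s n i j hi hij hj hdg) (hno (j - i) (by omega) (by omega))
    · -- B found the largest distance d with a repeat; A's max equals it
      obtain ⟨i, j, hi, hij, hj, hdg, he⟩ := Pb_to_pair s n _ hpos hPb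
      have hge : findDown s n (n - 2) ≤ r := he ▸ hU i j hi hij hj hdg
      rcases hA with h | ⟨i', j', hi', hij', hj', hdg', hm⟩
      · omega
      · -- the attained pair gives Pb at distance r, which cannot exceed B's answer
        have hPbr : Pb s n r := hm ▸ pair_to_Pb s n i' j' hi' hij' hj' hdg'
        by_contra hne
        exact hno r (by omega) (by omega) hPbr
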